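-- pv_equiv track=rewrite | github.com/Terristwj/IS111-Intro-to-Programming | IS111 - Introduction to Programming G2/My codes/IS111/Practical Week 6/In-class/movies_utility.py | get_title_of_longest_movie
-- ===== SOURCE A (Python) =====
-- def get_title_of_longest_movie(movie_list):
--     longest_duration = movie_list[0][2]
--     movie_title = movie_list[0][0]
--     for i in range(1, len(movie_list)):
--         if movie_list[i][2] > longest_duration:
--             longest_duration = movie_list[i][2]
--             movie_title = movie_list[i][0]
--     return movie_title
-- ===== SOURCE B (Python) =====
-- def get_title_of_longest_movie(movie_list):
--     ordered = sorted(movie_list, key=lambda m: m[2], reverse=True)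
--     return ordered[0][0]
-- ===== Notes on version B (the rewrite author's own statement) =====
-- stated objective: idiomatic
-- what changed: Replaces the manual index-loop max-scan with a stable reverse sort by duration followed by taking the first element (same result and tie-break by sort stability).
import Mathlib
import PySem

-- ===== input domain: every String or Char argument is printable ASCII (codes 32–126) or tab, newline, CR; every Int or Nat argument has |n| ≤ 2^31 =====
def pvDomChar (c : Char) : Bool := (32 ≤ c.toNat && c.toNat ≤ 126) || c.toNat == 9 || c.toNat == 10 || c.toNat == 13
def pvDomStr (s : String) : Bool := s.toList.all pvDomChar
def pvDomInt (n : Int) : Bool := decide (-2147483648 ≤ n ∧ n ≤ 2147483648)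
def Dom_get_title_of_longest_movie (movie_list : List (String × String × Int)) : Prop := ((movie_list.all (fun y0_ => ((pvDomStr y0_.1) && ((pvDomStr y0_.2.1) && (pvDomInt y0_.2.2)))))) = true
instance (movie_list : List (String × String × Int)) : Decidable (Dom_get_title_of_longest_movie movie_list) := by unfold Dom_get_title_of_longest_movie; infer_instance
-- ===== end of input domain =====

-- B replaces A's manual running-max index loop with a stable reverse sort by duration
-- followed by taking the first element (idiomatic sort-then-pick; same tie-break by stability).

-- ===== PORT A =====
-- literal transliteration of A's index loop with a (duration, title) running state
def get_title_of_longest_movie (movie_list : List (String × String × Int)) : String :=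
  match PySem.List.pyGet? movie_list 0 with
  | none => ""   -- movie_list[0] raises IndexError on []; excluded by Pre_
  | some m0 =>
    let st := (PySem.List.pyRange 1 (PySem.List.len movie_list)).foldl
      (fun (st : Int × String) i =>
        let m := PySem.List.pyGetD movie_list i m0
        if m.2.2 > st.1 then (m.2.2, m.1) else st)
      (m0.2.2, m0.1)
    st.2

-- ===== PORT B =====
-- literal transliteration of Source B: stable reverse sort by duration, then ordered[0][0]
def get_title_of_longest_movie_alt (movie_list : List (String × String × Int)) : String :=
  let ordered := PySem.List.sorted movie_list (fun m => m.2.2) true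
  match PySem.List.pyGet? ordered 0 with
  | none => ""   -- ordered[0] raises IndexError on []; excluded by Pre_
  | some m => m.1

-- ===== PRECONDITION & SPEC =====
-- Both A and B raise IndexError on the empty list; Pre_ excludes exactly that input.
def Pre_get_title_of_longest_movie (movie_list : List (String × String × Int)) : Prop :=
  movie_list ≠ []
instance (movie_list : List (String × String × Int)) : Decidable (Pre_get_title_of_longest_movie movie_list) := by unfold Pre_get_title_of_longest_movie; infer_instance

def pvWitness_get_title_of_longest_movie : (List (String × String × Int)) :=
  [("Up", "Pixar", 96), ("Heat", "WB", 170)]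

def Spec_get_title_of_longest_movie (movie_list : List (String × String × Int)) (out : String) : Prop := out = get_title_of_longest_movie_alt movie_list
instance (movie_list : List (String × String × Int)) (out : String) : Decidable (Spec_get_title_of_longest_movie movie_list out) := by unfold Spec_get_title_of_longest_movie; infer_instance

-- ===== CLAIM (what is proved, stated in full; the proofs are below) =====
def Claim_equal_get_title_of_longest_movie : Prop := ∀ (movie_list : List (String × String × Int)), Dom_get_title_of_longest_movie movie_list → Pre_get_title_of_longest_movie movie_list → Spec_get_title_of_longest_movie movie_list (get_title_of_longest_movie movie_list)

-- ===== LEMMAS AND PROOFS =====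

-- abbreviations used only by the proofs
def pvStep (st : Int × String) (m : String × String × Int) : Int × String :=
  if m.2.2 > st.1 then (m.2.2, m.1) else st

def pvIns (acc : List (String × String × Int)) (x : String × String × Int) :
    List (String × String × Int) :=
  PySem.List.insertBy (fun a b => decide (b.2.2 < a.2.2)) x acc

def pvHeadSt (l : List (String × String × Int)) : Int × String :=
  match l with
  | [] => (0, "")
  | m :: _ => (m.2.2, m.1)

-- core invariant: the running-max state tracks the head of the insertion-sorted accumulator
theorem pv_inv (rest : List (String × String × Int)) :
    ∀ (h : String × String × Int) (tl : List (String × String × Int)),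
    rest.foldl pvStep (h.2.2, h.1) = pvHeadSt (rest.foldl pvIns (h :: tl)) := by
  induction rest with
  | nil => intro h tl; rfl
  | cons x rest ih =>
    intro h tl
    simp only [List.foldl_cons]
    by_cases hc : h.2.2 < x.2.2
    · have e1 : pvStep (h.2.2, h.1) x = (x.2.2, x.1) := by
        simp [pvStep, hc]
      have e2 : pvIns (h :: tl) x = x :: h :: tl := by
        simp [pvIns, PySem.List.insertBy, hc]
      rw [e1, e2]; exact ih x (h :: tl)
    · have e1 : pvStep (h.2.2, h.1) x = (h.2.2, h.1) := by
        simp [pvStep]; omega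
      have e2 : pvIns (h :: tl) x
          = h :: PySem.List.insertBy (fun a b => decide (b.2.2 < a.2.2)) x tl := by
        simp [pvIns, PySem.List.insertBy, hc]
      rw [e1, e2]
      exact ih h _

-- ===== VERDICT (by name: the statement is the Claim_ definition above) =====
theorem get_title_of_longest_movie_spec : Claim_equal_get_title_of_longest_movie := by
  intro ml _ hpre
  unfold Spec_get_title_of_longest_movie
  match ml with
  | [] => exact absurd rfl hpre
  | m0 :: rest =>
    unfold get_title_of_longest_movie get_title_of_longest_movie_alt
    have hget : PySem.List.pyGet? (m0 :: rest) (0 : Int) = some m0 := by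
      simp [PySem.List.pyGet?, PySem.List.pyIdx?]
    rw [hget]
    have hfold :
        (PySem.List.pyRange 1 (PySem.List.len (m0 :: rest))).foldl
          (fun (st : Int × String) i =>
            let m := PySem.List.pyGetD (m0 :: rest) i m0
            if m.2.2 > st.1 then (m.2.2, m.1) else st)
          (m0.2.2, m0.1)
        = ((m0 :: rest).drop 1).foldl pvStep (m0.2.2, m0.1) := by
      exact PySem.List.foldl_pyRange_pyGetD (m0 :: rest) m0 pvStep (m0.2.2, m0.1) (by norm_num)
    simp only [hfold, List.drop_one, List.tail_cons]
    have hsorted : PySem.List.sorted (m0 :: rest) (fun m => m.2.2) true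
        = (m0 :: rest).foldl pvIns [] := by
      rw [PySem.List.sorted_rev_eq_foldl_insertBy]; rfl
    rw [hsorted]
    have := pv_inv rest m0 []
    have hne : (m0 :: rest).foldl pvIns [] ≠ [] := by
      rw [← hsorted]
      simp [PySem.List.sorted_eq_nil_iff]
    match hres : (m0 :: rest).foldl pvIns [] with
    | [] => exact absurd hres hne
    | h :: t =>
      have hfoldIns : (m0 :: rest).foldl pvIns [] = rest.foldl pvIns [m0] := by
        simp [List.foldl_cons, pvIns, PySem.List.insertBy]
      rw [hfoldIns] at hres
      have : rest.foldl pvStep (m0.2.2, m0.1) = pvHeadSt (h :: t) := by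
        rw [← hres]; exact pv_inv rest m0 []
      have hg2 : PySem.List.pyGet? (h :: t) (0 : Int) = some h := by
        simp [PySem.List.pyGet?, PySem.List.pyIdx?]
      rw [hg2]
      simp [this, pvHeadSt]
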